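-- pv_equiv track=rewrite | github.com/Ashiq-am/Path-of-Python | 3.Data Types/Arrays Set 1 and Set 2/Prefix/Count Array elements that occur before any of its prefix value of another Array/Count Array elements that occur before any of its prefix value of another Array.py | InvalidOrder
-- ===== SOURCE A (Python) =====
-- def InvalidOrder(a, b, n):
--
-- 	i, j, temp, validcount = 0, 0, 0, 0
--
-- 	# Loop to count the elements
-- 	# that are in valid order
-- 	while (i < n and j < n):
-- 		temp = j
-- 		while (temp < n and a[i] != b[temp]):
-- 			temp += 1
--
-- 		if (temp != n):
--
-- 			validcount += 1
-- 			j = temp + 1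
--
-- 		i += 1
--
-- 	# Return the answer
-- 	return (n - validcount)
-- ===== SOURCE B (Python) =====
-- def InvalidOrder(a, b, n):
--     # Index b's first n positions by value, then answer each greedy query
--     # "first position >= j holding a[i]" with a per-value cursor instead of
--     # rescanning b; each cursor only moves forward, so the whole run is
--     # O(n) amortized after the O(n) indexing pass.
--     pos = {}
--     for t in range(n):
--         pos.setdefault(b[t], []).append(t)
--     ptr = {}
--     validcount = 0
--     j = 0
--     for i in range(n):
--         v = a[i]
--         lst = pos.get(v, [])
--         p = ptr.get(v, 0)
--         while p < len(lst) and lst[p] < j: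
--             p += 1
--         if p < len(lst):
--             validcount += 1
--             j = lst[p] + 1
--             p += 1
--         ptr[v] = p
--     return n - validcount
-- ===== Notes on version B (the rewrite author's own statement) =====
-- stated objective: faster
-- what changed: Replaces A's per-element linear rescan of b with a one-pass value-to-positions index over b plus a forward-only per-value cursor, so each greedy query is answered without rescanning b.
-- outside the precondition, e.g. on InvalidOrder([1], [2, 1], 2): A returns 1, B raises IndexError
import Mathlib
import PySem

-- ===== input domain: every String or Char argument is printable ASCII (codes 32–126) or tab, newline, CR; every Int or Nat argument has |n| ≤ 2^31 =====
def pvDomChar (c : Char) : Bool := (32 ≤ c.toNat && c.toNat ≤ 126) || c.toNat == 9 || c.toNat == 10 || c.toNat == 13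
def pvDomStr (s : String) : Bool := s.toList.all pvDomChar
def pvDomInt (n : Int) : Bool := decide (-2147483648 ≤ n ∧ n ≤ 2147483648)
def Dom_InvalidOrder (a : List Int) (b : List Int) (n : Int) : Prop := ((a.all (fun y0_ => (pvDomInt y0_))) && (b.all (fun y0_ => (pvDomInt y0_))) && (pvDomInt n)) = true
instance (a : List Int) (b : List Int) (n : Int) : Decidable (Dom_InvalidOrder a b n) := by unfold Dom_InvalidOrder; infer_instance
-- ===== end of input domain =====

-- B replaces A's per-element linear rescan of b by a value-to-positions index of b
-- with forward-only per-value cursors (objective: faster).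


-- ===== PORT A =====
-- inner 'while (temp < n and a[i] != b[temp]): temp += 1'; fuel = (n - temp).toNat
def innerA (b : List Int) (n : Int) (ai : Int) : Int → Nat → Int
  | temp, 0 => temp
  | temp, f+1 =>
    if temp < n ∧ ai ≠ PySem.List.pyGetD b temp 0 then innerA b n ai (temp+1) f else temp

-- outer 'while (i < n and j < n)'; fuel = (n - i).toNat
def loopA (a : List Int) (b : List Int) (n : Int) : Int → Int → Int → Nat → Int
  | _, _, vc, 0 => n - vc
  | i, j, vc, f+1 =>
    if i < n ∧ j < n then
      let temp := innerA b n (PySem.List.pyGetD a i 0) j (n - j).toNat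
      if temp ≠ n then loopA a b n (i+1) (temp+1) (vc+1) f
      else loopA a b n (i+1) j vc f
    else n - vc

def InvalidOrder (a : List Int) (b : List Int) (n : Int) : Int :=
  loopA a b n 0 0 0 n.toNat

-- ===== PORT B =====
-- 'for t in range(n): pos.setdefault(b[t], []).append(t)'
def altPos (b : List Int) (n : Int) : PySem.Dict Int (List Int) :=
  (PySem.List.pyRange 0 n 1).foldl
    (fun d t => d.modify (PySem.List.pyGetD b t 0) [] (· ++ [t])) PySem.Dict.empty

-- 'while p < len(lst) and lst[p] < j: p += 1'; fuel = (len(lst) - p).toNat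
def altSkip (lst : List Int) (j : Int) : Int → Nat → Int
  | p, 0 => p
  | p, f+1 =>
    if p < (lst.length : Int) ∧ PySem.List.pyGetD lst p 0 < j then altSkip lst j (p+1) f else p

-- one iteration of the 'for i in range(n)' body; state = (ptr, validcount, j)
def altStep (a : List Int) (pos : PySem.Dict Int (List Int))
    (st : PySem.Dict Int Int × Int × Int) (i : Int) : PySem.Dict Int Int × Int × Int :=
  let v := PySem.List.pyGetD a i 0
  let lst := pos.getD v []
  let p := st.1.getD v 0
  let q := altSkip lst st.2.2 p (((lst.length : Int) - p).toNat)
  if q < (lst.length : Int) then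
    (st.1.insert v (q + 1), st.2.1 + 1, PySem.List.pyGetD lst q 0 + 1)
  else
    (st.1.insert v q, st.2.1, st.2.2)

def InvalidOrder_alt (a : List Int) (b : List Int) (n : Int) : Int :=
  let pos := altPos b n
  let st := (PySem.List.pyRange 0 n 1).foldl (altStep a pos) (PySem.Dict.empty, 0, 0)
  n - st.2.1

-- ===== PRECONDITION & SPEC =====
-- Pre_ excludes n > len(a) or n > len(b): there A's index accesses raise IndexError,
-- except in one early-exit corner (A matched b's last considered element with a not yet
-- exhausted) where A still returns but B's full scan of a[:n] itself raises.
def Pre_InvalidOrder (a : List Int) (b : List Int) (n : Int) : Prop :=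
  n ≤ (a.length : Int) ∧ n ≤ (b.length : Int)
instance (a : List Int) (b : List Int) (n : Int) : Decidable (Pre_InvalidOrder a b n) := by
  unfold Pre_InvalidOrder; infer_instance

def pvWitness_InvalidOrder : List Int × List Int × Int := ([2, 1, 4, 1], [1, 3, 2, 1], 4)

def Spec_InvalidOrder (a : List Int) (b : List Int) (n : Int) (out : Int) : Prop := out = InvalidOrder_alt a b n
instance (a : List Int) (b : List Int) (n : Int) (out : Int) : Decidable (Spec_InvalidOrder a b n out) := by unfold Spec_InvalidOrder; infer_instance

-- ===== CLAIM (what is proved, stated in full; the proofs are below) =====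
def Claim_equal_InvalidOrder : Prop := ∀ (a : List Int) (b : List Int) (n : Int), Dom_InvalidOrder a b n → Pre_InvalidOrder a b n → Spec_InvalidOrder a b n (InvalidOrder a b n)

-- ===== LEMMAS AND PROOFS =====

-- the positions of value v among b[0..n-1], in increasing order
def posL (b : List Int) (n : Int) (v : Int) : List Int :=
  (PySem.List.pyRange 0 n 1).filter (fun t => PySem.List.pyGetD b t 0 == v)
lemma mem_posL (b : List Int) (n v t : Int) :
    t ∈ posL b n v ↔ (0 ≤ t ∧ t < n ∧ PySem.List.pyGetD b t 0 = v) := by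
  simp [posL, List.mem_filter, PySem.List.mem_pyRange_one, and_assoc]

lemma pairwise_posL (b : List Int) (n v : Int) : (posL b n v).Pairwise (· < ·) :=
  (PySem.List.pairwise_lt_pyRange_one 0 n).filter _

lemma altPos_getD (b : List Int) (n v : Int) :
    (altPos b n).getD v [] = posL b n v := by
  have h : altPos b n = ((PySem.List.pyRange 0 n 1).map
      (fun t => (PySem.List.pyGetD b t 0, t))).foldl
      (fun d p => d.modify p.1 [] (· ++ [p.2])) PySem.Dict.empty := by
    rw [List.foldl_map]; rfl
  rw [h, PySem.Dict.getD_foldl_modify_append]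
  simp [posL, List.filter_map, List.map_map, Function.comp_def]

lemma innerA_spec (b : List Int) (n v : Int) :
    ∀ (f : Nat) (temp : Int), temp ≤ n → (n - temp).toNat ≤ f →
      temp ≤ innerA b n v temp f ∧ innerA b n v temp f ≤ n ∧
      (∀ t, temp ≤ t → t < innerA b n v temp f → PySem.List.pyGetD b t 0 ≠ v) ∧
      (innerA b n v temp f < n → PySem.List.pyGetD b (innerA b n v temp f) 0 = v) := by
  intro f
  induction f with
  | zero =>
    intro temp h1 h2
    have : temp = n := by omega
    subst this
    simp only [innerA]
    refine ⟨le_refl _, le_refl _, fun t h1 h2 => absurd h1 (by omega), fun h => absurd h (by omega)⟩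
  | succ f ih =>
    intro temp h1 h2
    by_cases hc : temp < n ∧ v ≠ PySem.List.pyGetD b temp 0
    · have hrec := ih (temp+1) (by omega) (by omega)
      simp only [innerA, if_pos hc]
      refine ⟨by omega, hrec.2.1, ?_, hrec.2.2.2⟩
      intro t ht1 ht2
      rcases eq_or_lt_of_le ht1 with h | h
      · subst h; exact fun he => hc.2 he.symm
      · exact hrec.2.2.1 t (by omega) ht2
    · simp only [innerA, if_neg hc]
      refine ⟨le_refl _, h1, fun t ht1 ht2 => absurd ht1 (by omega), fun hlt => ?_⟩
      by_contra hne
      exact hc ⟨hlt, fun he => hne he.symm⟩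

lemma altSkip_spec (lst : List Int) (j : Int) :
    ∀ (f : Nat) (p : Int), 0 ≤ p → p ≤ (lst.length : Int) →
      ((lst.length : Int) - p).toNat ≤ f →
      p ≤ altSkip lst j p f ∧ altSkip lst j p f ≤ (lst.length : Int) ∧
      (∀ k : Int, p ≤ k → k < altSkip lst j p f → PySem.List.pyGetD lst k 0 < j) ∧
      (altSkip lst j p f < (lst.length : Int) → ¬ PySem.List.pyGetD lst (altSkip lst j p f) 0 < j) := by
  intro f
  induction f with
  | zero =>
    intro p h0 h1 h2
    have : p = (lst.length : Int) := by omega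
    subst this
    simp only [altSkip]
    exact ⟨le_refl _, le_refl _, fun k h1 h2 => absurd h1 (by omega), fun h => absurd h (by omega)⟩
  | succ f ih =>
    intro p h0 h1 h2
    by_cases hc : p < (lst.length : Int) ∧ PySem.List.pyGetD lst p 0 < j
    · have hrec := ih (p+1) (by omega) (by omega) (by omega)
      simp only [altSkip, if_pos hc]
      refine ⟨by omega, hrec.2.1, ?_, hrec.2.2.2⟩
      intro k hk1 hk2
      rcases eq_or_lt_of_le hk1 with h | h
      · subst h; exact hc.2
      · exact hrec.2.2.1 k (by omega) hk2
    · simp only [altSkip, if_neg hc]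
      exact ⟨le_refl _, h1, fun k hk1 hk2 => absurd hk1 (by omega),
        fun hlt hlt2 => hc ⟨hlt, hlt2⟩⟩

lemma bridge (b : List Int) (n v j q : Int) (hj0 : 0 ≤ j) (hjn : j ≤ n)
    (hq0 : 0 ≤ q) (hqlen : q ≤ ((posL b n v).length : Int))
    (hpre : ∀ k : Int, 0 ≤ k → k < q → PySem.List.pyGetD (posL b n v) k 0 < j)
    (hat : q < ((posL b n v).length : Int) → j ≤ PySem.List.pyGetD (posL b n v) q 0) :
    innerA b n v j ((n - j).toNat) =
      (if q < ((posL b n v).length : Int) then PySem.List.pyGetD (posL b n v) q 0 else n) := by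
  set L := posL b n v with hL
  obtain ⟨hr1, hr2, hr3, hr4⟩ := innerA_spec b n v ((n - j).toNat) j hjn (le_refl _)
  set r := innerA b n v j ((n - j).toNat) with hr
  have hpw := pairwise_posL b n v
  rw [List.pairwise_iff_getElem] at hpw
  rw [← hL] at hpw
  have hgetk : ∀ (k : Nat) (hk : k < L.length), PySem.List.pyGetD L (k : Int) 0 = L[k]'hk := by
    intro k hk
    rw [PySem.List.pyGetD_eq_getElem _ 0 (by omega) (by omega)]
    simp
  by_cases hq : q < (L.length : Int)
  · rw [if_pos hq]
    have hq' : q.toNat < L.length := by omega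
    have heq : PySem.List.pyGetD L q 0 = L[q.toNat] := by
      rw [PySem.List.pyGetD_eq_getElem _ 0 hq0 (by omega)]
    have he : L[q.toNat] ∈ L := List.getElem_mem _
    obtain ⟨he0, hen, hebv⟩ := (mem_posL b n v _).mp he
    have hje : j ≤ L[q.toNat] := by rw [heq] at hat; exact hat hq
    have hre : r ≤ L[q.toNat] := by
      by_contra hcon
      exact hr3 _ hje (by omega) hebv
    have hrn : r < n := lt_of_le_of_lt hre hen
    have hrL : r ∈ L := (mem_posL b n v r).mpr ⟨by omega, hrn, hr4 hrn⟩
    obtain ⟨k, hk, hke⟩ := List.getElem_of_mem hrL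
    rcases lt_or_ge k q.toNat with hlt | hge
    · exfalso
      have := hpre (k : Int) (by omega) (by omega)
      rw [hgetk k hk, hke] at this
      omega
    · rcases lt_or_eq_of_le hge with hgt | heqk
      · exfalso
        have := hpw q.toNat k hq' hk hgt
        rw [hke] at this
        omega
      · have hqk : L[q.toNat] = L[k] := by
          subst heqk; rfl
        rw [heq, hqk, hke]
  · rw [if_neg hq]
    have hqlen' : q = (L.length : Int) := by omega
    by_contra hne
    have hrn : r < n := by omega
    have hrL : r ∈ L := (mem_posL b n v r).mpr ⟨by omega, hrn, hr4 hrn⟩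
    obtain ⟨k, hk, hke⟩ := List.getElem_of_mem hrL
    have := hpre (k : Int) (by omega) (by omega)
    rw [hgetk k hk, hke] at this
    omega

lemma posL_elt (b : List Int) (n v q : Int) (h0 : 0 ≤ q) (hlt : q < ((posL b n v).length : Int)) :
    0 ≤ PySem.List.pyGetD (posL b n v) q 0 ∧ PySem.List.pyGetD (posL b n v) q 0 < n := by
  rw [PySem.List.pyGetD_eq_getElem _ 0 h0 hlt]
  have := (mem_posL b n v _).mp (List.getElem_mem (l := posL b n v) (n := q.toNat) (by omega))
  exact ⟨this.1, this.2.1⟩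

def InvB (b : List Int) (n : Int) (ptr : PySem.Dict Int Int) (j : Int) : Prop :=
  ∀ v : Int, 0 ≤ ptr.getD v 0 ∧ ptr.getD v 0 ≤ ((posL b n v).length : Int) ∧
    ∀ k : Int, 0 ≤ k → k < ptr.getD v 0 → PySem.List.pyGetD (posL b n v) k 0 < j

lemma tailB (a b : List Int) (n : Int) :
    ∀ (l : List Int) (ptr : PySem.Dict Int Int) (vc j : Int), n ≤ j → InvB b n ptr j →
      (l.foldl (altStep a (altPos b n)) (ptr, vc, j)).2.1 = vc := by
  intro l
  induction l with
  | nil => intro ptr vc j _ _; rfl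
  | cons i l ih =>
    intro ptr vc j hnj hInv
    rw [List.foldl_cons]
    set v := PySem.List.pyGetD a i 0 with hv
    obtain ⟨hp0, hplen, hppre⟩ := hInv v
    set p := ptr.getD v 0 with hp
    set L := posL b n v with hLdef
    obtain ⟨hs1, hs2, hs3, hs4⟩ := altSkip_spec L j (((L.length : Int) - p).toNat) p hp0 hplen (le_refl _)
    set q := altSkip L j p (((L.length : Int) - p).toNat) with hqdef
    have hqlen : ¬ q < (L.length : Int) := by
      intro hlt
      have he := posL_elt b n v q (by omega) (by rw [← hLdef]; exact hlt)
      rw [← hLdef] at he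
      have := hs4 hlt
      omega
    have hstep : altStep a (altPos b n) (ptr, vc, j) i = (ptr.insert v q, vc, j) := by
      simp only [altStep, altPos_getD, ← hv, ← hLdef, ← hp, ← hqdef, if_neg hqlen]
    rw [hstep]
    refine ih _ _ _ hnj ?_
    intro v'
    rw [PySem.Dict.getD_insert]
    by_cases hvv : v' = v
    · subst hvv
      rw [if_pos rfl, ← hLdef]
      refine ⟨by omega, hs2, fun k hk0 hkq => ?_⟩
      rcases lt_or_ge k p with hkp | hkp
      · exact hppre k hk0 hkp
      · exact hs3 k hkp hkq
    · rw [if_neg hvv]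
      exact hInv v'

lemma mainLoop (a b : List Int) (n : Int) :
    ∀ (k : Nat) (i j vc : Int) (ptr : PySem.Dict Int Int),
      (n - i).toNat = k → 0 ≤ j → j ≤ n → InvB b n ptr j →
      loopA a b n i j vc k =
        n - ((PySem.List.pyRange i n 1).foldl (altStep a (altPos b n)) (ptr, vc, j)).2.1 := by
  intro k
  induction k with
  | zero =>
    intro i j vc ptr hk _ _ _
    rw [PySem.List.pyRange_one_eq_nil (by omega)]
    rfl
  | succ k ih =>
    intro i j vc ptr hk hj0 hjn hInv
    have hin : i < n := by omega
    rw [PySem.List.pyRange_one_cons (by omega), List.foldl_cons]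
    by_cases hjltn : j < n
    · set v := PySem.List.pyGetD a i 0 with hv
      obtain ⟨hp0, hplen, hppre⟩ := hInv v
      set p := ptr.getD v 0 with hp
      set L := posL b n v with hLdef
      obtain ⟨hs1, hs2, hs3, hs4⟩ := altSkip_spec L j (((L.length : Int) - p).toNat) p hp0 hplen (le_refl _)
      set q := altSkip L j p (((L.length : Int) - p).toNat) with hqdef
      have hqpre : ∀ k' : Int, 0 ≤ k' → k' < q → PySem.List.pyGetD L k' 0 < j := by
        intro k' h0 hq'
        rcases lt_or_ge k' p with hkp | hkp
        · exact hppre k' h0 hkp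
        · exact hs3 k' hkp hq'
      have hqat : q < (L.length : Int) → j ≤ PySem.List.pyGetD L q 0 := by
        intro hlt; have := hs4 hlt; omega
      have hbr := bridge b n v j q hj0 hjn (by omega) (by rw [← hLdef]; exact hs2)
        (by rw [← hLdef]; exact hqpre) (by rw [← hLdef]; exact hqat)
      rw [← hLdef] at hbr
      simp only [loopA, if_pos (And.intro hin hjltn), ← hv, hbr]
      by_cases hql : q < (L.length : Int)
      · have he := posL_elt b n v q (by omega) (by rw [← hLdef]; exact hql)
        rw [← hLdef] at he
        have hje : j ≤ PySem.List.pyGetD L q 0 := hqat hql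
        have hstep : altStep a (altPos b n) (ptr, vc, j) i =
            (ptr.insert v (q + 1), vc + 1, PySem.List.pyGetD L q 0 + 1) := by
          simp only [altStep, altPos_getD, ← hv, ← hLdef, ← hp, ← hqdef, if_pos hql]
        rw [if_pos hql, if_pos (by omega : PySem.List.pyGetD L q 0 ≠ n), hstep]
        refine ih (i+1) _ (vc+1) _ (by omega) (by omega) (by omega) ?_
        intro v'
        rw [PySem.Dict.getD_insert]
        by_cases hvv : v' = v
        · subst hvv
          rw [if_pos rfl, ← hLdef]
          refine ⟨by omega, by omega, fun k' h0 hq' => ?_⟩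
          rcases lt_or_ge k' q with hkq | hkq
          · have := hqpre k' h0 hkq; omega
          · have : k' = q := by omega
            subst this; omega
        · rw [if_neg hvv]
          obtain ⟨h1, h2, h3⟩ := hInv v'
          exact ⟨h1, h2, fun k' ha hb => by have := h3 k' ha hb; omega⟩
      · have hstep : altStep a (altPos b n) (ptr, vc, j) i = (ptr.insert v q, vc, j) := by
          simp only [altStep, altPos_getD, ← hv, ← hLdef, ← hp, ← hqdef, if_neg hql]
        rw [if_neg hql, if_neg (by omega : ¬ (n : Int) ≠ n), hstep]
        refine ih (i+1) _ vc _ (by omega) hj0 hjn ?_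
        intro v'
        rw [PySem.Dict.getD_insert]
        by_cases hvv : v' = v
        · subst hvv
          rw [if_pos rfl, ← hLdef]
          refine ⟨by omega, hs2, fun k' h0 hq' => ?_⟩
          rcases lt_or_ge k' p with hkp | hkp
          · exact hppre k' h0 hkp
          · exact hs3 k' hkp hq'
        · rw [if_neg hvv]
          exact hInv v'
    · have hA : loopA a b n i j vc (k+1) = n - vc := by
        simp only [loopA]
        rw [if_neg (by omega : ¬ (i < n ∧ j < n))]
      rw [hA]
      have := tailB a b n (i :: PySem.List.pyRange (i+1) n 1) ptr vc j (by omega) hInv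
      rw [List.foldl_cons] at this
      rw [this]

-- ===== VERDICT (by name: the statement is the Claim_ definition above) =====
theorem InvalidOrder_spec : Claim_equal_InvalidOrder := by
  intro a b n _ _
  unfold Spec_InvalidOrder InvalidOrder InvalidOrder_alt
  by_cases hn : 0 ≤ n
  · have hInv : InvB b n PySem.Dict.empty 0 := by
      intro v
      rw [PySem.Dict.getD_empty]
      exact ⟨le_refl 0, Int.natCast_nonneg _, fun k h1 h2 => absurd h1 (by omega)⟩
    have := mainLoop a b n n.toNat 0 0 0 PySem.Dict.empty (by omega) (le_refl 0) hn hInv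
    simpa using this
  · rw [PySem.List.pyRange_one_eq_nil (by omega)]
    have : n.toNat = 0 := by omega
    rw [this]
    rfl
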